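-- pv_equiv track=rewrite | github.com/QuangNhatvo/DoAnCuoiKy | minimization_state2.py | create_group_list
-- ===== SOURCE A (Python) =====
-- def create_group_list (A,B,C):
--     A = []
--     for i in range(4):
--         if i == 0 or i == 1: binary_array = [int(bit) for bit in format(i, '02b')]
--         else: binary_array = [int(bit) for bit in bin(i)[2:]]
--         A.append ([])
--         for j in range (len(B)):
--             if binary_array == B[j] :
--                 A[i].append (C[j])
--             else: continue
--
--     A = list(filter(lambda x: len(x) > 0, A))
--     return A
-- ===== SOURCE B (Python) =====
-- def create_group_list(A, B, C):
--     codes = [[0, 0], [0, 1], [1, 0], [1, 1]]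
--     buckets = [[], [], [], []]
--     for j in range(len(B)):
--         if B[j] in codes:
--             buckets[codes.index(B[j])].append(C[j])
--     return [b for b in buckets if b]
-- ===== Notes on version B (the rewrite author's own statement) =====
-- stated objective: simpler
-- what changed: Replaces A's four separate scans of B (one per binary code, rebuilt each round from string formatting) by a single indexed pass that dispatches each C[j] into one of four pre-declared code buckets, then keeps the non-empty buckets in fixed code order.
import Mathlib
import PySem

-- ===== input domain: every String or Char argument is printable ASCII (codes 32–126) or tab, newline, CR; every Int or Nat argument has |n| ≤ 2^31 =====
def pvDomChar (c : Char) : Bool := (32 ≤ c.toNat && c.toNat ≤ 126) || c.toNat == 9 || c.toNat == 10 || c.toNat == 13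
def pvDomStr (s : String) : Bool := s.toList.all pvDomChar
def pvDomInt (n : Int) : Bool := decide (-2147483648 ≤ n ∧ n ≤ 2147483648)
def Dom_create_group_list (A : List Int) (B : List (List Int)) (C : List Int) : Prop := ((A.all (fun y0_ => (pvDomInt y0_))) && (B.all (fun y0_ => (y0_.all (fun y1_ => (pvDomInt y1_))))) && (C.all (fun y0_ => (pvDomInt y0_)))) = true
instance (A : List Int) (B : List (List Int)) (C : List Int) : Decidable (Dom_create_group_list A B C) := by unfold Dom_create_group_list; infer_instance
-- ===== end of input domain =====

-- B replaces A's four passes over B (one per binary code) by a single indexed pass into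
-- four pre-declared buckets; objective: simpler. Equivalence of RETURN values is proved.

-- ===== PORT A =====
-- binary code for i ∈ {0,1,2,3}: [int(bit) for bit in format(i,'02b')] resp. bin(i)[2:];
-- the two-digit expansion of the string formatting is written arithmetically (exact for 0 ≤ i < 4).
def pvBinOf (i : Nat) : List Int :=
  if i = 0 ∨ i = 1 then [0, (i : Int)] else [1, (i : Int) - 2]

-- inner loop body of A: for j in range(len(B)): if binary_array == B[j]: A[i].append(C[j])
def pvStepA (B : List (List Int)) (C : List Int) (i : Nat) (bk : List Int) (j : Nat) : List Int :=
  if pvBinOf i = B.getD j [] then bk ++ [C.getD j 0] else bk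

def create_group_list (A : List Int) (B : List (List Int)) (C : List Int) : List (List Int) :=
  ((List.range 4).foldl
      (fun acc i => acc ++ [(List.range B.length).foldl (pvStepA B C i) []]) []).filter
    (fun x => 0 < x.length)

-- ===== PORT B =====
def pvCodes : List (List Int) := [[0, 0], [0, 1], [1, 0], [1, 1]]

-- loop body of B: if B[j] in codes: buckets[codes.index(B[j])].append(C[j])
def pvStepB (B : List (List Int)) (C : List Int) (bks : List (List Int)) (j : Nat) : List (List Int) :=
  match PySem.List.index? pvCodes (B.getD j []) with
  | some k => bks.set k (bks.getD k [] ++ [C.getD j 0])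
  | none => bks

def create_group_list_alt (A : List Int) (B : List (List Int)) (C : List Int) : List (List Int) :=
  ((List.range B.length).foldl (pvStepB B C) [[], [], [], []]).filter (fun x => 0 < x.length)

-- ===== PRECONDITION & SPEC =====
-- Pre_ excludes exactly the inputs where Python A raises IndexError on C[j]:
-- some index j with B[j] equal to one of the four codes but j ≥ len(C).  (B raises there too.)
def Pre_create_group_list (A : List Int) (B : List (List Int)) (C : List Int) : Prop :=
  ∀ j, j < B.length → B.getD j [] ∈ pvCodes → j < C.length
instance (A : List Int) (B : List (List Int)) (C : List Int) : Decidable (Pre_create_group_list A B C) := by unfold Pre_create_group_list; infer_instance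

def pvWitness_create_group_list : List Int × List (List Int) × List Int :=
  ([], [[0, 0], [2, 5], [1, 1]], [3, 4, 5])

def Spec_create_group_list (A : List Int) (B : List (List Int)) (C : List Int) (out : List (List Int)) : Prop := out = create_group_list_alt A B C
instance (A : List Int) (B : List (List Int)) (C : List Int) (out : List (List Int)) : Decidable (Spec_create_group_list A B C out) := by unfold Spec_create_group_list; infer_instance

-- ===== CLAIM (what is proved, stated in full; the proofs are below) =====
def Claim_equal_create_group_list : Prop := ∀ (A : List Int) (B : List (List Int)) (C : List Int), Dom_create_group_list A B C → Pre_create_group_list A B C → Spec_create_group_list A B C (create_group_list A B C)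

-- ===== LEMMAS AND PROOFS =====

-- B's single pass over range n maintains exactly A's four per-code buckets.
theorem pv_buckets_eq (B : List (List Int)) (C : List Int) (n : Nat) :
    (List.range n).foldl (pvStepB B C) [[], [], [], []] =
      [(List.range n).foldl (pvStepA B C 0) [], (List.range n).foldl (pvStepA B C 1) [],
       (List.range n).foldl (pvStepA B C 2) [], (List.range n).foldl (pvStepA B C 3) []] := by
  induction n with
  | zero => rfl
  | succ n ih =>
    rw [List.range_succ]
    simp only [List.foldl_append, List.foldl_cons, List.foldl_nil, ih]
    simp only [pvStepB, pvStepA, pvBinOf]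
    by_cases h0 : B.getD n [] = [0, 0]
    · rw [h0, show PySem.List.index? pvCodes ([0, 0] : List Int) = some 0 from by decide]
      simp
    · by_cases h1 : B.getD n [] = [0, 1]
      · rw [h1, show PySem.List.index? pvCodes ([0, 1] : List Int) = some 1 from by decide]
        simp
      · by_cases h2 : B.getD n [] = [1, 0]
        · rw [h2, show PySem.List.index? pvCodes ([1, 0] : List Int) = some 2 from by decide]
          simp
        · by_cases h3 : B.getD n [] = [1, 1]
          · rw [h3, show PySem.List.index? pvCodes ([1, 1] : List Int) = some 3 from by decide]
            simp
          · have hn : PySem.List.index? pvCodes (B.getD n []) = none := by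
              rw [PySem.List.index?_eq_none_iff]
              simp only [pvCodes, List.mem_cons, List.not_mem_nil, or_false]
              push_neg
              exact ⟨h0, h1, h2, h3⟩
            rw [hn, if_neg (fun h => absurd h.symm h0), if_neg (fun h => absurd h.symm h1),
              if_neg (fun h => absurd h.symm h2), if_neg (fun h => absurd h.symm h3)]

-- ===== VERDICT (by name: the statement is the Claim_ definition above) =====
theorem create_group_list_spec : Claim_equal_create_group_list := by
  intro A B C _ _
  unfold Spec_create_group_list create_group_list create_group_list_alt
  rw [pv_buckets_eq]
  rfl
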